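-- pv_equiv track=rewrite | github.com/Alice1nCradle/CTFShow-Web | Web入门/SQL注入/web185-186/web185-186.py | createNum
-- ===== SOURCE A (Python) =====
-- def createNum(n):
--     num = "true"
--     if n == 1:
--         return "true"
--     else:
--         for i in range(n - 1):
--             num += "+true"
--     return num
-- ===== SOURCE B (Python) =====
-- def createNum(n):
--     return "true" + "+true" * (n - 1)
-- ===== Notes on version B (the rewrite author's own statement) =====
-- stated objective: idiomatic
-- what changed: Replaced the branch plus concatenation loop with the closed-form string repetition "true" + "+true"*(n-1), which covers n==1 and n<=0 with no branch.
import Mathlib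
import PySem

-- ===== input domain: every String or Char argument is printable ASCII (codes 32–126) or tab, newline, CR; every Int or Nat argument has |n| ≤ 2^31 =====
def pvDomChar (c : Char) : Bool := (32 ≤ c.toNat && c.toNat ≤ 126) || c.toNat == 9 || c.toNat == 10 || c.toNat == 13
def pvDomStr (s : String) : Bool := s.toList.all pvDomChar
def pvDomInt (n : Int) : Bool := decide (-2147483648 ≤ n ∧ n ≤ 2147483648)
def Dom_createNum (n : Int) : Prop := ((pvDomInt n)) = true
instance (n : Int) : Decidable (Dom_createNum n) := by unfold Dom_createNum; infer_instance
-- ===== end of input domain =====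

-- B replaces A's branch and concatenation loop by the closed-form "true" + "+true"*(n-1) (idiomatic).

-- ===== PORT A =====
def createNum (n : Int) : String :=
  let num := "true"
  if n = 1 then "true"
  else (PySem.List.pyRange 0 (n - 1) 1).foldl (fun num _ => num ++ "+true") num

-- ===== PORT B =====
def createNum_alt (n : Int) : String :=
  "true" ++ String.ofList (PySem.List.pyRepeat "+true".toList (n - 1))

-- ===== PRECONDITION & SPEC =====
def Spec_createNum (n : Int) (out : String) : Prop := out = createNum_alt n
instance (n : Int) (out : String) : Decidable (Spec_createNum n out) := by unfold Spec_createNum; infer_instance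

-- ===== CLAIM (what is proved, stated in full; the proofs are below) =====
def Claim_equal_createNum : Prop := ∀ (n : Int), Dom_createNum n → Spec_createNum n (createNum n)

-- ===== LEMMAS AND PROOFS =====

theorem pv_mk_append (a b : List Char) : String.ofList (a ++ b) = String.ofList a ++ String.ofList b := by simp

theorem pv_foldl_append (l : List Int) (s : String) :
    l.foldl (fun num _ => num ++ "+true") s
      = s ++ String.ofList ((List.replicate l.length "+true".toList).flatten) := by
  induction l generalizing s with
  | nil => simp
  | cons x t ih =>
      simp only [List.foldl_cons, ih, List.length_cons, List.replicate_succ, List.flatten_cons,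
        pv_mk_append, ← String.append_assoc]
      rfl

-- ===== VERDICT (by name: the statement is the Claim_ definition above) =====
theorem createNum_spec : Claim_equal_createNum := by
  intro n _
  show createNum n = createNum_alt n
  unfold createNum createNum_alt PySem.List.pyRepeat
  by_cases h : n = 1
  · subst h; simp
  · simp only [if_neg h, pv_foldl_append, PySem.List.length_pyRange_one]
    norm_num
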